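-- pv_equiv track=rewrite | github.com/Aasthaengg/IBMdataset | Python_codes/p03592/s216431545.py | solve
-- ===== SOURCE A (Python) =====
-- def solve(D):
--     N = D[0]
--     M = D[1]
--     K = D[2]
--
--     for i in range(N+1):
--         for j in range(M+1):
--             if (i*(M-j) + (N-i)*j) == K:
--                 return "Yes"
--
--     return "No"
-- ===== SOURCE B (Python) =====
-- def solve(D):
--     N = D[0]
--     M = D[1]
--     K = D[2]
--     if M < 0:
--         return "No"
--     for i in range(N + 1):
--         d = N - 2 * i
--         r = K - i * M
--         if d == 0:
--             if r == 0:
--                 return "Yes"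
--         elif r % d == 0 and 0 <= r // d <= M:
--             return "Yes"
--     return "No"
-- ===== Notes on version B (the rewrite author's own statement) =====
-- stated objective: faster
-- what changed: Replace the O(N*M) double loop over (i,j) by a single loop over i that solves i*M + j*(N-2i) = K for j algebraically (divisibility + range check), after an upfront M<0 early exit.
import Mathlib
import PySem

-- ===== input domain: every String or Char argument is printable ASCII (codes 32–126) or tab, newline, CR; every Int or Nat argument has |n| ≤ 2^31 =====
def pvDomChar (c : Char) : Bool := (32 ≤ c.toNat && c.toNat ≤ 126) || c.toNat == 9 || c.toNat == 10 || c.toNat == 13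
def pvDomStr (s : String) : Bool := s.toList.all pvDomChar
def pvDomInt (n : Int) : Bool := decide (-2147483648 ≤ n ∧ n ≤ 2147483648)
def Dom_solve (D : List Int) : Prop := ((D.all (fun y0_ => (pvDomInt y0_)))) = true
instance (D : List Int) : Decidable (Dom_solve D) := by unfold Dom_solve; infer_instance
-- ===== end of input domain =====

-- B replaces A's O(N*M) double loop by an O(N) loop that solves for j algebraically.

-- ===== PORT A =====
def solve (D : List Int) : String :=
  match PySem.List.pyGet? D 0, PySem.List.pyGet? D 1, PySem.List.pyGet? D 2 with
  | some N, some M, some K =>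
    if (PySem.List.pyRange 0 (N+1) 1).any (fun i =>
         (PySem.List.pyRange 0 (M+1) 1).any (fun j => i*(M-j) + (N-i)*j == K))
    then "Yes" else "No"
  | _, _, _ => ""  -- IndexError in Python; excluded by Pre_solve

-- ===== PORT B =====
def solve_alt (D : List Int) : String :=
  ((PySem.List.pyGet? D 0).bind fun N =>
    (PySem.List.pyGet? D 1).bind fun M =>
    (PySem.List.pyGet? D 2).map fun K =>
    if M < 0 then "No"
    else if (PySem.List.pyRange 0 (N+1) 1).any (fun i =>
          let d := N - 2*i
          let r := K - i*M
          if d = 0 then r == 0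
          else (PySem.Int.mod r d == 0 &&
                decide (0 ≤ PySem.Int.floordiv r d) &&
                decide (PySem.Int.floordiv r d ≤ M)))
    then "Yes" else "No").getD ""  -- none = IndexError in Python; excluded by Pre_solve

-- ===== PRECONDITION & SPEC =====
-- A raises IndexError when the list has fewer than 3 elements; B does too.
def Pre_solve (D : List Int) : Prop := 3 ≤ D.length
instance (D : List Int) : Decidable (Pre_solve D) := by unfold Pre_solve; infer_instance
def pvWitness_solve : List Int := [3, 3, 5]
def Spec_solve (D : List Int) (out : String) : Prop := out = solve_alt D
instance (D : List Int) (out : String) : Decidable (Spec_solve D out) := by unfold Spec_solve; infer_instance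

-- ===== CLAIM (what is proved, stated in full; the proofs are below) =====
def Claim_equal_solve : Prop := ∀ (D : List Int), Dom_solve D → Pre_solve D → Spec_solve D (solve D)

-- ===== LEMMAS AND PROOFS =====

-- inner loop of A, for one i, characterised as an existential
lemma innerA_iff (N M K i : Int) :
    (∃ j ∈ PySem.List.pyRange 0 (M+1) 1, (i*(M-j) + (N-i)*j == K) = true)
      ↔ ∃ j : Int, 0 ≤ j ∧ j ≤ M ∧ i*M + j*(N - 2*i) = K := by
  simp only [PySem.List.mem_pyRange_one, beq_iff_eq]
  constructor
  · rintro ⟨j, ⟨h0, h1⟩, he⟩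
    exact ⟨j, h0, by omega, by ring_nf; ring_nf at he; linarith⟩
  · rintro ⟨j, h0, h1, he⟩
    exact ⟨j, ⟨h0, by omega⟩, by ring_nf; ring_nf at he; linarith⟩

-- B's per-i test equals the same existential (for 0 ≤ M)
lemma innerB_iff (N M K i : Int) (hM : 0 ≤ M) :
    ((if N - 2*i = 0 then ((K - i*M : Int) == 0)
      else (PySem.Int.mod (K - i*M) (N - 2*i) == 0 &&
            decide (0 ≤ PySem.Int.floordiv (K - i*M) (N - 2*i)) &&
            decide (PySem.Int.floordiv (K - i*M) (N - 2*i) ≤ M))) = true)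
      ↔ ∃ j : Int, 0 ≤ j ∧ j ≤ M ∧ i*M + j*(N - 2*i) = K := by
  by_cases h : N - 2*i = 0
  · rw [if_pos h]
    simp only [beq_iff_eq]
    constructor
    · intro h0
      refine ⟨0, le_refl 0, hM, ?_⟩
      rw [h, mul_zero, add_zero]; omega
    · rintro ⟨j, _, _, he⟩
      rw [h, mul_zero, add_zero] at he; omega
  · rw [if_neg h]
    simp only [Bool.and_eq_true, beq_iff_eq, decide_eq_true_eq]
    constructor
    · rintro ⟨⟨hm, hq0⟩, hqM⟩
      refine ⟨PySem.Int.floordiv (K - i*M) (N - 2*i), hq0, hqM, ?_⟩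
      have hfm := PySem.Int.floordiv_mul_add_mod (K - i*M) (N - 2*i)
      rw [hm, add_zero] at hfm
      linarith
    · rintro ⟨j, h0, h1, he⟩
      have hjd : j * (N - 2*i) = K - i*M := by linarith
      have hdvd : (N - 2*i) ∣ (K - i*M) := ⟨j, by linarith [mul_comm j (N - 2*i)]⟩
      have hm : PySem.Int.mod (K - i*M) (N - 2*i) = 0 :=
        (PySem.Int.mod_eq_zero_iff_dvd (K - i*M) (N - 2*i)).mpr hdvd
      have hfd : PySem.Int.floordiv (K - i*M) (N - 2*i) * (N - 2*i) = K - i*M := by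
        have hfm := PySem.Int.floordiv_mul_add_mod (K - i*M) (N - 2*i)
        rw [hm, add_zero] at hfm
        exact hfm
      have hqj : PySem.Int.floordiv (K - i*M) (N - 2*i) = j := by
        have hz : (PySem.Int.floordiv (K - i*M) (N - 2*i) - j) * (N - 2*i) = 0 := by
          rw [sub_mul, hfd, hjd]; ring
        rcases mul_eq_zero.mp hz with h' | h'
        · omega
        · exact absurd h' h
      rw [hqj]
      exact ⟨⟨hm, h0⟩, h1⟩

lemma body_eq (N M K : Int) :
    (if (PySem.List.pyRange 0 (N+1) 1).any (fun i =>
         (PySem.List.pyRange 0 (M+1) 1).any (fun j => i*(M-j) + (N-i)*j == K))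
     then "Yes" else "No")
    = (if M < 0 then "No"
       else if (PySem.List.pyRange 0 (N+1) 1).any (fun i =>
            if N - 2*i = 0 then ((K - i*M : Int) == 0)
            else (PySem.Int.mod (K - i*M) (N - 2*i) == 0 &&
                  decide (0 ≤ PySem.Int.floordiv (K - i*M) (N - 2*i)) &&
                  decide (PySem.Int.floordiv (K - i*M) (N - 2*i) ≤ M)))
       then "Yes" else "No") := by
  by_cases hM : M < 0
  · rw [if_pos hM]
    have hnil : PySem.List.pyRange 0 (M+1) 1 = [] :=
      PySem.List.pyRange_one_eq_nil (by omega)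
    rw [hnil]
    simp
  · rw [if_neg hM]
    have hb : ((PySem.List.pyRange 0 (N+1) 1).any (fun i =>
         (PySem.List.pyRange 0 (M+1) 1).any (fun j => i*(M-j) + (N-i)*j == K)))
        = ((PySem.List.pyRange 0 (N+1) 1).any (fun i =>
            if N - 2*i = 0 then ((K - i*M : Int) == 0)
            else (PySem.Int.mod (K - i*M) (N - 2*i) == 0 &&
                  decide (0 ≤ PySem.Int.floordiv (K - i*M) (N - 2*i)) &&
                  decide (PySem.Int.floordiv (K - i*M) (N - 2*i) ≤ M)))) := by
      apply Bool.eq_iff_iff.mpr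
      simp only [List.any_eq_true]
      constructor
      · rintro ⟨i, hi, hin⟩
        exact ⟨i, hi, (innerB_iff N M K i (by omega)).mpr ((innerA_iff N M K i).mp hin)⟩
      · rintro ⟨i, hi, hin⟩
        exact ⟨i, hi, (innerA_iff N M K i).mpr ((innerB_iff N M K i (by omega)).mp hin)⟩
    rw [hb]

-- ===== VERDICT (by name: the statement is the Claim_ definition above) =====
theorem solve_spec : Claim_equal_solve := by
  intro D _ hpre
  unfold Pre_solve at hpre
  match D, hpre with
  | N :: M :: K :: t, _ =>
    show solve (N :: M :: K :: t) = solve_alt (N :: M :: K :: t)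
    have h0 : PySem.List.pyGet? (N :: M :: K :: t) 0 = some N := by
      simp [PySem.List.pyGet?, PySem.List.pyIdx?]
      rw [if_pos (by omega)]
      simp
    have h1 : PySem.List.pyGet? (N :: M :: K :: t) 1 = some M := by
      simp [PySem.List.pyGet?, PySem.List.pyIdx?]
      rw [if_pos (by omega)]
      simp
    have h2 : PySem.List.pyGet? (N :: M :: K :: t) 2 = some K := by
      simp [PySem.List.pyGet?, PySem.List.pyIdx?]
      rw [if_pos (by omega)]
      simp
    rw [solve, solve_alt, h0, h1, h2]
    simp only [Option.bind_some, Option.map_some, Option.getD_some]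
    exact body_eq N M K
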